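-- pv_equiv track=rewrite | github.com/mageshyt/INTERVIEW-PREP | Algorithms/graph/dfs & bfs/14.Word Ladder II.py | findLadders2
-- ===== SOURCE A (Python) =====
-- from typing import List
-- from collections import deque
-- import string
--
-- def findLadders2(beginWord: str, endWord: str, wordList: List[str]) -> List[List[str]]:
--
--     if endWord not in wordList:
--         return []
--     wordQueue=deque([beginWord])
--
--     wordMap = {}
--     wordMap[beginWord] = 1
--
--     while wordQueue:
--         word= wordQueue.popleft()
--         for i in range(len(word)):
--             for c in string.ascii_lowercase:
--                 newWord = word[:i]+c+word[i+1:]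
--
--                 if newWord in wordList and newWord not in wordMap:
--                     wordMap[newWord]=wordMap[word]+1
--                     wordQueue.append(newWord)
--
--
--
--
--
--     def backtrack(word,path:List[str]):
--         if word==beginWord:
--             return [path[::-1]]
--
--         res=[]
--
--
--         for i in range(len(word)):
--             for c in string.ascii_lowercase:
--                 newWord = word[:i]+c+word[i+1:]
--                 # is this word in dict
--                 if newWord in wordMap and wordMap[newWord]==wordMap[word]-1:
--                     res.extend(backtrack(newWord,path+[newWord]))
--
--         return res
--
--
--     return backtrack(endWord,[endWord])
-- ===== SOURCE B (Python) =====
-- from typing import List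
-- from collections import deque
-- import string
--
-- def findLadders2(beginWord: str, endWord: str, wordList: List[str]) -> List[List[str]]:
--     if endWord not in wordList:
--         return []
--
--     # phase 1: level BFS (kept as in A: records each word's shortest level)
--     wordQueue = deque([beginWord])
--     wordMap = {beginWord: 1}
--     while wordQueue:
--         word = wordQueue.popleft()
--         for i in range(len(word)):
--             for c in string.ascii_lowercase:
--                 newWord = word[:i] + c + word[i + 1:]
--                 if newWord in wordList and newWord not in wordMap:
--                     wordMap[newWord] = wordMap[word] + 1
--                     wordQueue.append(newWord)
--
--     if endWord not in wordMap:
--         return []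
--
--     # phase 2: bottom-up DP over BFS levels, no recursion.  paths[w] holds every
--     # shortest ladder beginWord..w, built exactly once by extending the ladders of
--     # w's predecessors (enumerated in the same (i, c) order A's backtrack uses).
--     def preds(w):
--         subs = [w[:i] + c + w[i + 1:] for i in range(len(w)) for c in string.ascii_lowercase]
--         return [nw for nw in subs if nw in wordMap and wordMap[nw] == wordMap[w] - 1]
--
--     paths = {beginWord: [[beginWord]]}
--     for lvl in range(2, wordMap[endWord] + 1):
--         for w in wordMap:
--             if wordMap[w] == lvl:
--                 paths[w] = [p + [w] for par in preds(w) for p in paths.get(par, [])]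
--     return paths.get(endWord, [])
-- ===== Notes on version B (the rewrite author's own statement) =====
-- stated objective: alternative
-- what changed: Phase-1 level BFS is kept; A's recursive backtracking from endWord is replaced by a non-recursive bottom-up dynamic program that sweeps the BFS levels 2..level(endWord) and builds the list of shortest ladders ending at each word exactly once by extending its predecessors' ladders (predecessors enumerated in the same (i,c) substitution order, so the output list is identical).
-- crash fix: When endWord is in wordList but unreachable from beginWord while one of its one-letter lowercase substitutions is reachable, A raises KeyError (wordMap[endWord]) and B returns []. — e.g. on findLadders2("ab", "Ab", ["Ab"]): A raises KeyError, B returns []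
import Mathlib
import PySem

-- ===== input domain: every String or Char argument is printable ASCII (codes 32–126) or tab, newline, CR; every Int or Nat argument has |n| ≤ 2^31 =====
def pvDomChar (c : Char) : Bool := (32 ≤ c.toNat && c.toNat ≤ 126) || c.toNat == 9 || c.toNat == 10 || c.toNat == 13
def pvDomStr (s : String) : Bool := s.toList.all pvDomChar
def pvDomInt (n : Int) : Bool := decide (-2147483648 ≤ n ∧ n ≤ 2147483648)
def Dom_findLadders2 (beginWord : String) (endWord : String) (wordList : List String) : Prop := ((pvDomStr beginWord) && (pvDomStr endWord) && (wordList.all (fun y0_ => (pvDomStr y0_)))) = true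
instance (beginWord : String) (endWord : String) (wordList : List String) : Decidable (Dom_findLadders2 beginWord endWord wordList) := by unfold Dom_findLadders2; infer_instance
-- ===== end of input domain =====

-- B keeps A's phase-1 level BFS and replaces A's recursive backtracking by a
-- non-recursive bottom-up DP over BFS levels that builds each word's ladder list
-- once, extending predecessors enumerated in the same (i, c) order.

-- ===== PORT A =====
-- string.ascii_lowercase
def pvLower : List Char := "abcdefghijklmnopqrstuvwxyz".toList

-- word[:i] + c + word[i+1:]  (exact for 0 ≤ i < len(word), the indices range() produces)
def pvSub (w : List Char) (i : Nat) (c : Char) : String :=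
  String.mk (w.take i ++ [c] ++ w.drop (i + 1))

-- the nested 'for i in range(len(word)): for c in string.ascii_lowercase:' as one pair list
def pvPairs (word : String) : List (Nat × Char) :=
  (List.range word.toList.length).flatMap (fun i => pvLower.map (fun c => (i, c)))

-- body of the BFS while-loop for one (i, c): state = (rest of queue ++ appended, wordMap)
def pvBfsStep (wordList : List String) (word : String)
    (st : List String × PySem.Dict String Int) (ic : Nat × Char) :
    List String × PySem.Dict String Int :=
  let nw := pvSub word.toList ic.1 ic.2
  if wordList.contains nw && !(st.2.contains nw) then
    (st.1 ++ [nw], st.2.insert nw (st.2.getD word 0 + 1))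
  else st

-- 'while wordQueue:' — fuel wordList.length + 1 is enough: every pop was an enqueue,
-- and enqueues are 1 (beginWord) + inserts of fresh keys drawn from wordList
def pvBfs (wordList : List String) : Nat → List String → PySem.Dict String Int → PySem.Dict String Int
  | 0, _, m => m
  | _ + 1, [], m => m
  | f + 1, word :: rest, m =>
      let st := (pvPairs word).foldl (pvBfsStep wordList word) (rest, m)
      pvBfs wordList f st.1 st.2

-- phase 1: wordMap (shared verbatim by both versions)
def pvWordMap (beginWord : String) (wordList : List String) : PySem.Dict String Int :=
  pvBfs wordList (wordList.length + 1) [beginWord] (PySem.Dict.empty.insert beginWord 1)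

-- A's recursive backtrack.  Python's recursion is unbounded; the fuel (one unit per
-- level, started at wordMap[endWord]) is exact because each recursive call goes to a
-- word whose wordMap level is one smaller, and beginWord is the only word at level 1.
mutual
def pvBacktrack (b : String) (m : PySem.Dict String Int) :
    Nat → String → List String → List (List String)
  | fuel, word, path =>
    if word == b then [path.reverse]
    else match fuel with
      | 0 => []
      | f + 1 => pvBtFold b m f word path (pvPairs word) []
termination_by fuel word path => (fuel, 0)

def pvBtFold (b : String) (m : PySem.Dict String Int) (f : Nat) (word : String)
    (path : List String) : List (Nat × Char) → List (List String) → List (List String)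
  | [], res => res
  | ic :: rest, res =>
    let nw := pvSub word.toList ic.1 ic.2
    let res' := if (m.get? nw).isSome && (m.getD nw 0 == m.getD word 0 - 1) then
        res ++ pvBacktrack b m f nw (path ++ [nw])
      else res
    pvBtFold b m f word path rest res'
termination_by L res => (f, L.length + 1)
end

def findLadders2 (beginWord : String) (endWord : String) (wordList : List String) :
    List (List String) :=
  if !(wordList.contains endWord) then []
  else
    let m := pvWordMap beginWord wordList
    pvBacktrack beginWord m (m.getD endWord 0).toNat endWord [endWord]

-- ===== PORT B =====
-- [w[:i]+c+w[i+1:] for i in range(len(w)) for c in string.ascii_lowercase]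
def pvSubsOf (w : String) : List String :=
  (List.range w.toList.length).flatMap (fun i => pvLower.map (fun c => pvSub w.toList i c))

-- preds(w): the substitutions one BFS level below w, in (i, c) order
def pvPreds (m : PySem.Dict String Int) (w : String) : List String :=
  (pvSubsOf w).filter (fun nw => (m.get? nw).isSome && (m.getD nw 0 == m.getD w 0 - 1))

-- body of B's inner 'for w in wordMap:' loop at level k
def pvDpStep (m : PySem.Dict String Int) (k : Int)
    (P : PySem.Dict String (List (List String))) (w : String) :
    PySem.Dict String (List (List String)) :=
  if m.getD w 0 == k then
    P.insert w ((pvPreds m w).flatMap (fun par => (P.getD par []).map (fun p => p ++ [w])))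
  else P

def findLadders2_alt (beginWord : String) (endWord : String) (wordList : List String) :
    List (List String) :=
  if !(wordList.contains endWord) then []
  else
    let m := pvWordMap beginWord wordList
    if !(m.contains endWord) then []
    else
      let paths := (PySem.List.pyRange 2 (m.getD endWord 0 + 1) 1).foldl
        (fun P lvl => m.keys.foldl (pvDpStep m lvl) P)
        (PySem.Dict.empty.insert beginWord [[beginWord]])
      paths.getD endWord []

-- ===== PRECONDITION & SPEC =====
-- neighbours of u: every one-position lowercase substitution of u
def pvNbrs (u : String) : List String :=
  (pvPairs u).map (fun ic => pvSub u.toList ic.1 ic.2)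

-- one closure step: adjoin the wordList words adjacent to the current set
def pvReachStep (ws : List String) (s : List String) : List String :=
  s ++ ws.filter (fun v => !(s.contains v) && s.any (fun u => (pvNbrs u).contains v))

-- all words reachable from b through ws by single lowercase-letter substitutions
-- (ws.length closure steps reach the fixpoint: each productive step adds a word of ws)
def pvReach (b : String) (ws : List String) : List String :=
  (List.range ws.length).foldl (fun s _ => pvReachStep ws s) [b]

-- Pre_ excludes exactly the inputs on which A raises KeyError: endWord is in wordList
-- but unreachable from beginWord, while one of endWord's substitution-neighbours is
-- reachable (so A's backtrack evaluates wordMap[endWord] on a missing key).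
def Pre_findLadders2 (beginWord : String) (endWord : String) (wordList : List String) : Prop :=
  endWord ∈ wordList →
    (endWord ∈ pvReach beginWord wordList ∨
     ∀ n ∈ pvNbrs endWord, n ∉ pvReach beginWord wordList)
instance (beginWord : String) (endWord : String) (wordList : List String) :
    Decidable (Pre_findLadders2 beginWord endWord wordList) := by
  unfold Pre_findLadders2; infer_instance

def pvWitness_findLadders2 : String × String × List String := ("a", "c", ["b", "c"])

-- On inputs where endWord is in wordList, unreachable, but has a reachable neighbour,
-- A raises KeyError while B returns [].
def Raises_findLadders2 (beginWord : String) (endWord : String) (wordList : List String) : Prop :=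
  endWord ∈ wordList ∧ endWord ∉ pvReach beginWord wordList ∧
    ∃ n ∈ pvNbrs endWord, n ∈ pvReach beginWord wordList
instance (beginWord : String) (endWord : String) (wordList : List String) :
    Decidable (Raises_findLadders2 beginWord endWord wordList) := by
  unfold Raises_findLadders2; infer_instance

def pvRaiseWitness_findLadders2 : String × String × List String := ("ab", "Ab", ["Ab"])
def pvRaiseWitnessOut_findLadders2 : List (List String) := []

def Spec_findLadders2 (beginWord : String) (endWord : String) (wordList : List String) (out : List (List String)) : Prop := out = findLadders2_alt beginWord endWord wordList
instance (beginWord : String) (endWord : String) (wordList : List String) (out : List (List String)) : Decidable (Spec_findLadders2 beginWord endWord wordList out) := by unfold Spec_findLadders2; infer_instance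

-- ===== CLAIM (what is proved, stated in full; the proofs are below) =====
def Claim_equal_findLadders2 : Prop := ∀ (beginWord : String) (endWord : String) (wordList : List String), Dom_findLadders2 beginWord endWord wordList → Pre_findLadders2 beginWord endWord wordList → Spec_findLadders2 beginWord endWord wordList (findLadders2 beginWord endWord wordList)

def Claim_raises_findLadders2 : Prop := (∀ (beginWord : String) (endWord : String) (wordList : List String), Dom_findLadders2 beginWord endWord wordList → Raises_findLadders2 beginWord endWord wordList → ¬ Pre_findLadders2 beginWord endWord wordList) ∧ (Dom_findLadders2 (pvRaiseWitness_findLadders2.1) (pvRaiseWitness_findLadders2.2.1) (pvRaiseWitness_findLadders2.2.2) ∧ Raises_findLadders2 (pvRaiseWitness_findLadders2.1) (pvRaiseWitness_findLadders2.2.1) (pvRaiseWitness_findLadders2.2.2) ∧ findLadders2_alt (pvRaiseWitness_findLadders2.1) (pvRaiseWitness_findLadders2.2.1) (pvRaiseWitness_findLadders2.2.2) = pvRaiseWitnessOut_findLadders2)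

-- ===== LEMMAS AND PROOFS =====

-- pure specification recursion both phase-2 implementations are reduced to
mutual
def pvS (b : String) (m : PySem.Dict String Int) : Nat → String → List (List String)
  | fuel, word =>
    if word == b then [[b]]
    else match fuel with
      | 0 => []
      | f + 1 => pvSFold b m f word (pvPairs word) []
termination_by fuel word => (fuel, 0)

def pvSFold (b : String) (m : PySem.Dict String Int) (f : Nat) (word : String) :
    List (Nat × Char) → List (List String) → List (List String)
  | [], res => res
  | ic :: rest, res =>
    let nw := pvSub word.toList ic.1 ic.2
    let res' := if (m.get? nw).isSome && (m.getD nw 0 == m.getD word 0 - 1) then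
        res ++ (pvS b m f nw).map (fun p => p ++ [word])
      else res
    pvSFold b m f word rest res'
termination_by L res => (f, L.length + 1)
end

theorem pvSFold_mem (b : String) (m : PySem.Dict String Int) (f : Nat) (word : String) :
    ∀ (L : List (Nat × Char)) (res p), p ∈ pvSFold b m f word L res →
      p ∈ res ∨ ∃ q, p = q ++ [word] := by
  intro L
  induction L with
  | nil => intro res p hp; simp only [pvSFold] at hp; exact Or.inl hp
  | cons ic rest ih =>
    intro res p hp
    simp only [pvSFold] at hp
    rcases ih _ p hp with h | h
    · by_cases hc : ((m.get? (pvSub word.toList ic.1 ic.2)).isSome &&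
        (m.getD (pvSub word.toList ic.1 ic.2) 0 == m.getD word 0 - 1)) = true
      · simp only [hc, if_true, List.mem_append, List.mem_map] at h
        rcases h with h | ⟨q, _, rfl⟩
        · exact Or.inl h
        · exact Or.inr ⟨q, rfl⟩
      · rw [if_neg hc] at h
        exact Or.inl h
    · exact Or.inr h

theorem pvS_ends (b : String) (m : PySem.Dict String Int) (fuel : Nat) (word : String)
    (p : List String) (hp : p ∈ pvS b m fuel word) : ∃ q, p = q ++ [word] := by
  rw [pvS.eq_def] at hp
  by_cases hb : (word == b) = true
  · simp only [hb, if_true, List.mem_singleton] at hp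
    exact ⟨[], by simp [hp, eq_of_beq hb]⟩
  · simp only [hb, if_false] at hp
    match fuel with
    | 0 => simp at hp
    | f + 1 =>
      rcases pvSFold_mem b m f word (pvPairs word) [] p hp with h | h
      · simp at h
      · exact h

theorem pvBtFold_eq (b : String) (m : PySem.Dict String Int) (f : Nat) (word : String)
    (path : List String)
    (hIH : ∀ w' path', pvBacktrack b m f w' path' =
      (pvS b m f w').map (fun q => q.dropLast ++ path'.reverse)) :
    ∀ (L : List (Nat × Char)) (res : List (List String)),
      pvBtFold b m f word path L (res.map (fun q => q.dropLast ++ path.reverse)) =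
        (pvSFold b m f word L res).map (fun q => q.dropLast ++ path.reverse) := by
  intro L
  induction L with
  | nil => intro res; simp only [pvBtFold, pvSFold]
  | cons ic rest ih =>
    intro res
    simp only [pvBtFold, pvSFold]
    by_cases hc : ((m.get? (pvSub word.toList ic.1 ic.2)).isSome &&
        (m.getD (pvSub word.toList ic.1 ic.2) 0 == m.getD word 0 - 1)) = true
    · rw [if_pos hc, if_pos hc]
      have key : res.map (fun q => q.dropLast ++ path.reverse) ++
          pvBacktrack b m f (pvSub word.toList ic.1 ic.2) (path ++ [pvSub word.toList ic.1 ic.2]) =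
          (res ++ (pvS b m f (pvSub word.toList ic.1 ic.2)).map (fun p => p ++ [word])).map
            (fun q => q.dropLast ++ path.reverse) := by
        rw [List.map_append, List.map_map]
        congr 1
        rw [hIH]
        apply List.map_congr_left
        intro q hq
        rcases pvS_ends b m f _ q hq with ⟨q0, rfl⟩
        simp
      rw [key, ih]
    · rw [if_neg hc, if_neg hc]
      exact ih res

theorem pvBacktrack_eq (b : String) (m : PySem.Dict String Int) :
    ∀ (fuel : Nat) (word : String) (path : List String),
      pvBacktrack b m fuel word path =
        (pvS b m fuel word).map (fun q => q.dropLast ++ path.reverse) := by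
  intro fuel
  induction fuel with
  | zero =>
    intro word path
    rw [pvBacktrack.eq_def, pvS.eq_def]
    by_cases hb : (word == b) = true
    · simp [hb]
    · simp [hb]
  | succ f ih =>
    intro word path
    rw [pvBacktrack.eq_def, pvS.eq_def]
    by_cases hb : (word == b) = true
    · simp [hb]
    · simp only [hb, Bool.false_eq_true, if_false]
      have h := pvBtFold_eq b m f word path (fun w' p' => ih w' p') (pvPairs word) []
      simpa using h

-- the BFS map is well-formed: beginWord has level 1, every other key level ≥ 2
def pvGood (b : String) (m : PySem.Dict String Int) : Prop :=
  m.get? b = some 1 ∧ ∀ x, x ≠ b → m.contains x = true → 2 ≤ m.getD x 0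

theorem pvBfsFold_inv (ws : List String) (b word : String) :
    ∀ (L : List (Nat × Char)) (st : List String × PySem.Dict String Int),
      pvGood b st.2 → (∀ w ∈ st.1, st.2.contains w = true) → st.2.contains word = true →
      pvGood b (L.foldl (pvBfsStep ws word) st).2 ∧
        (∀ w ∈ (L.foldl (pvBfsStep ws word) st).1,
          (L.foldl (pvBfsStep ws word) st).2.contains w = true) ∧
        (L.foldl (pvBfsStep ws word) st).2.contains word = true := by
  intro L
  induction L with
  | nil => intro st h1 h2 h3; exact ⟨h1, h2, h3⟩
  | cons ic rest ih =>
    intro st h1 h2 h3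
    simp only [List.foldl_cons]
    apply ih
    · -- pvGood preserved by one step
      simp only [pvBfsStep]
      split
      · rename_i hcond
        have hfresh : st.2.contains (pvSub word.toList ic.1 ic.2) = false := by
          rcases Bool.and_eq_true_iff.mp hcond with ⟨_, hn⟩
          simpa using hn
        have hbc : st.2.contains b = true := by
          rw [PySem.Dict.contains_eq_isSome_get?, h1.1]; rfl
        have hbne : b ≠ pvSub word.toList ic.1 ic.2 := by
          intro h; rw [← h] at hfresh; rw [hbc] at hfresh; cases hfresh
        constructor
        · dsimp only
          rw [PySem.Dict.get?_insert_of_ne _ _ hbne]; exact h1.1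
        · intro x hx hcx
          rw [PySem.Dict.getD_insert]
          by_cases hxe : x = pvSub word.toList ic.1 ic.2
          · rw [if_pos hxe]
            have hwv : 1 ≤ st.2.getD word 0 := by
              by_cases hw : word = b
              · rw [hw, PySem.Dict.getD_of_get?_eq_some _ _ h1.1]
              · have := h1.2 word hw h3; omega
            omega
          · rw [if_neg hxe]
            apply h1.2 x hx
            rw [PySem.Dict.contains_insert] at hcx
            rcases Bool.or_eq_true_iff.mp hcx with h | h
            · exact absurd (eq_of_beq h) hxe
            · exact h
      · exact h1
    · -- queue members contained
      intro w hw
      simp only [pvBfsStep] at hw ⊢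
      by_cases hcond : (ws.contains (pvSub word.toList ic.1 ic.2) &&
          !st.2.contains (pvSub word.toList ic.1 ic.2)) = true
      · rw [if_pos hcond] at hw ⊢
        dsimp only at hw ⊢
        rcases List.mem_append.mp hw with hw | hw
        · rw [PySem.Dict.contains_insert, h2 w hw, Bool.or_true]
        · rw [List.mem_singleton] at hw
          subst hw
          exact PySem.Dict.contains_insert_self _ _ _
      · rw [if_neg hcond] at hw ⊢
        exact h2 w hw
    · -- word itself stays contained
      simp only [pvBfsStep]
      by_cases hcond : (ws.contains (pvSub word.toList ic.1 ic.2) &&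
          !st.2.contains (pvSub word.toList ic.1 ic.2)) = true
      · rw [if_pos hcond]
        dsimp only
        rw [PySem.Dict.contains_insert, h3, Bool.or_true]
      · rw [if_neg hcond]
        exact h3

theorem pvBfs_good (ws : List String) (b : String) :
    ∀ (fuel : Nat) (q : List String) (m : PySem.Dict String Int),
      pvGood b m → (∀ w ∈ q, m.contains w = true) → pvGood b (pvBfs ws fuel q m) := by
  intro fuel
  induction fuel with
  | zero => intro q m h _; simpa [pvBfs] using h
  | succ f ih =>
    intro q m h hq
    cases q with
    | nil => simpa [pvBfs] using h
    | cons word rest =>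
      simp only [pvBfs]
      have hinv := pvBfsFold_inv ws b word (pvPairs word) (rest, m) h
        (fun w hw => hq w (List.mem_cons_of_mem _ hw)) (hq word (List.mem_cons_self))
      exact ih _ _ hinv.1 hinv.2.1

theorem pvWordMap_good (b : String) (ws : List String) : pvGood b (pvWordMap b ws) := by
  unfold pvWordMap
  apply pvBfs_good
  · constructor
    · exact PySem.Dict.get?_insert_self _ _ _
    · intro x hx hcx
      rw [PySem.Dict.contains_insert] at hcx
      rcases Bool.or_eq_true_iff.mp hcx with h | h
      · exact absurd (eq_of_beq h) hx
      · rw [PySem.Dict.contains_empty] at h; cases h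
  · intro w hw
    simp only [List.mem_singleton] at hw
    subst hw
    exact PySem.Dict.contains_insert_self _ _ _

theorem pvWordMap_contains_begin (b : String) (ws : List String) :
    (pvWordMap b ws).contains b = true := by
  rw [PySem.Dict.contains_eq_isSome_get?, (pvWordMap_good b ws).1]; rfl

-- the (i, c) substitution list equals B's comprehension
theorem pvSubsOf_eq (w : String) :
    pvSubsOf w = (pvPairs w).map (fun ic => pvSub w.toList ic.1 ic.2) := by
  simp [pvSubsOf, pvPairs, List.map_flatMap, List.map_map, Function.comp_def]

-- A's inner fold as a flatMap over the filtered substitution list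
theorem pvSFold_eq_flatMap (b : String) (m : PySem.Dict String Int) (f : Nat) (word : String) :
    ∀ (L : List (Nat × Char)) (res : List (List String)),
      pvSFold b m f word L res =
        res ++ ((L.map (fun ic => pvSub word.toList ic.1 ic.2)).filter
            (fun nw => (m.get? nw).isSome && (m.getD nw 0 == m.getD word 0 - 1))).flatMap
          (fun nw => (pvS b m f nw).map (fun p => p ++ [word])) := by
  intro L
  induction L with
  | nil => intro res; simp [pvSFold]
  | cons ic rest ih =>
    intro res
    simp only [pvSFold, List.map_cons, List.filter_cons]
    by_cases hc : ((m.get? (pvSub word.toList ic.1 ic.2)).isSome &&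
        (m.getD (pvSub word.toList ic.1 ic.2) 0 == m.getD word 0 - 1)) = true
    · rw [if_pos hc, if_pos hc, ih]
      simp [List.append_assoc]
    · rw [if_neg hc, if_neg hc, ih]

-- DP-table invariant: every word whose level S admits carries its pvS ladder list
def pvDPInv (b : String) (m : PySem.Dict String Int) (S : String → Prop)
    (P : PySem.Dict String (List (List String))) : Prop :=
  P.get? b = some [[b]] ∧
    ∀ w, w ≠ b → m.contains w = true → S w →
      P.get? w = some (pvS b m (m.getD w 0).toNat w)

theorem pvDpFold_notmem (m : PySem.Dict String Int) (k : Int) :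
    ∀ (ks : List String) (P : PySem.Dict String (List (List String))) (x : String),
      x ∉ ks → (ks.foldl (pvDpStep m k) P).get? x = P.get? x := by
  intro ks
  induction ks with
  | nil => intro P x _; rfl
  | cons w0 rest ih =>
    intro P x hx
    simp only [List.mem_cons, not_or] at hx
    simp only [List.foldl_cons]
    rw [ih _ _ hx.2]
    simp only [pvDpStep]
    split
    · exact PySem.Dict.get?_insert_of_ne _ _ hx.1
    · rfl

theorem pvDpFold_inv (b : String) (m : PySem.Dict String Int) (hg : pvGood b m)
    (k : Int) (hk : 2 ≤ k) (S : String → Prop)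
    (hSlt : ∀ w, S w → m.getD w 0 < k)
    (hSge : ∀ w, w ≠ b → m.contains w = true → 2 ≤ m.getD w 0 → m.getD w 0 < k → S w) :
    ∀ (ks : List String) (P : PySem.Dict String (List (List String))),
      (∀ w ∈ ks, m.contains w = true) → pvDPInv b m S P →
      pvDPInv b m (fun w => S w ∨ (m.getD w 0 = k ∧ w ∈ ks)) (ks.foldl (pvDpStep m k) P) := by
  intro ks
  induction ks with
  | nil =>
    intro P _ hP
    refine ⟨hP.1, ?_⟩
    intro w hw hc hS
    rcases hS with hS | ⟨_, hmem⟩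
    · exact hP.2 w hw hc hS
    · cases hmem
  | cons w0 rest ih =>
    intro P hks hP
    have hbv : m.getD b 0 = 1 := PySem.Dict.getD_of_get?_eq_some _ _ hg.1
    simp only [List.foldl_cons]
    by_cases hE : (m.getD w0 0 == k) = true
    · -- w0 is at level k: it is inserted with its correct ladder list
      have hkw0 : m.getD w0 0 = k := eq_of_beq hE
      have hw0b : w0 ≠ b := by intro h; rw [h, hbv] at hkw0; omega
      set val := (pvPreds m w0).flatMap
        (fun par => (P.getD par []).map (fun p => p ++ [w0])) with hval
      have hstep : pvDpStep m k P w0 = P.insert w0 val := by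
        simp only [pvDpStep, hE, if_pos]
        rw [hval]
      -- the inserted value is pvS at w0
      have hcorrect : val = pvS b m (m.getD w0 0).toNat w0 := by
        have hf : (m.getD w0 0).toNat = ((m.getD w0 0).toNat - 1) + 1 := by omega
        set f := (m.getD w0 0).toNat - 1 with hfdef
        rw [hf, pvS.eq_def]
        have : (w0 == b) = false := by simpa using hw0b
        simp only [this, Bool.false_eq_true, if_false]
        rw [pvSFold_eq_flatMap, List.nil_append, hval, pvPreds, pvSubsOf_eq]
        apply List.flatMap_congr
        intro par hpar
        have hcond := List.of_mem_filter hpar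
        rcases Bool.and_eq_true_iff.mp hcond with ⟨hsome, hlev⟩
        have hparlev : m.getD par 0 = k - 1 := by
          have := eq_of_beq hlev; omega
        by_cases hpb : par = b
        · have hgetb : P.getD par [] = [[b]] := by
            rw [hpb]; exact PySem.Dict.getD_of_get?_eq_some _ _ hP.1
          have hSb : pvS b m f par = [[b]] := by
            rw [hpb, pvS.eq_def]; simp
          rw [hgetb, hSb]
        · have hcpar : m.contains par = true := by
            rw [PySem.Dict.contains_eq_isSome_get?]; exact hsome
          have h2par : 2 ≤ m.getD par 0 := hg.2 par hpb hcpar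
          have hSpar : S par := hSge par hpb hcpar h2par (by omega)
          have hPpar := hP.2 par hpb hcpar hSpar
          have hfe : (m.getD par 0).toNat = f := by omega
          rw [PySem.Dict.getD_of_get?_eq_some _ _ hPpar, hfe]
      -- the inserted dict still satisfies the invariant for S
      have hP' : pvDPInv b m S (P.insert w0 val) := by
        constructor
        · rw [PySem.Dict.get?_insert_of_ne _ _ (Ne.symm hw0b)]; exact hP.1
        · intro w hw hc hS
          have hlt := hSlt w hS
          have hwne : w ≠ w0 := by intro h; rw [h, hkw0] at hlt; omega
          rw [PySem.Dict.get?_insert_of_ne _ _ hwne]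
          exact hP.2 w hw hc hS
      have hrest := ih (P.insert w0 val) (fun w hw => hks w (List.mem_cons_of_mem _ hw)) hP'
      rw [hstep]
      refine ⟨hrest.1, ?_⟩
      intro w hw hc hS
      rcases hS with hS | ⟨hlev, hmem⟩
      · exact hrest.2 w hw hc (Or.inl hS)
      · rcases List.mem_cons.mp hmem with rfl | hmem'
        · by_cases hin : w ∈ rest
          · exact hrest.2 w hw hc (Or.inr ⟨hlev, hin⟩)
          · rw [pvDpFold_notmem m k rest _ w hin,
              PySem.Dict.get?_insert_self, hcorrect]
        · exact hrest.2 w hw hc (Or.inr ⟨hlev, hmem'⟩)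
    · -- w0 is not at level k: the dict is unchanged at this step
      have hstep : pvDpStep m k P w0 = P := by
        simp only [pvDpStep, hE]; rfl
      rw [hstep]
      have hrest := ih P (fun w hw => hks w (List.mem_cons_of_mem _ hw)) hP
      refine ⟨hrest.1, ?_⟩
      intro w hw hc hS
      rcases hS with hS | ⟨hlev, hmem⟩
      · exact hrest.2 w hw hc (Or.inl hS)
      · rcases List.mem_cons.mp hmem with rfl | hmem'
        · exact absurd (beq_iff_eq.mpr hlev) (by simpa using hE)
        · exact hrest.2 w hw hc (Or.inr ⟨hlev, hmem'⟩)

theorem pvDpOuter (b : String) (m : PySem.Dict String Int) (hg : pvGood b m) :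
    ∀ (n : Nat) (k : Int), k + 1 = 2 + n →
      pvDPInv b m (fun w => 2 ≤ m.getD w 0 ∧ m.getD w 0 ≤ k)
        ((PySem.List.pyRange 2 (k + 1) 1).foldl
          (fun P lvl => m.keys.foldl (pvDpStep m lvl) P)
          (PySem.Dict.empty.insert b [[b]])) := by
  intro n
  induction n with
  | zero =>
    intro k hkn
    have hk1 : k = 1 := by omega
    subst hk1
    rw [PySem.List.pyRange_one_eq_nil (by omega)]
    constructor
    · exact PySem.Dict.get?_insert_self _ _ _
    · intro w _ _ hS; omega
  | succ n ih =>
    intro k hkn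
    have hk2 : 2 ≤ k := by omega
    rw [PySem.List.pyRange_one_succ_right (by omega), List.foldl_append]
    simp only [List.foldl_cons, List.foldl_nil]
    have hprev := ih (k - 1) (by omega)
    have hsimp : k - 1 + 1 = k := by omega
    rw [hsimp] at hprev
    have hres := pvDpFold_inv b m hg k hk2
      (fun w => 2 ≤ m.getD w 0 ∧ m.getD w 0 ≤ k - 1)
      (fun w hS => by omega)
      (fun w _ _ h2 hlt => ⟨h2, by omega⟩)
      m.keys _
      (fun w hw => (PySem.Dict.contains_iff_mem_keys _ _).mpr hw)
      hprev
    refine ⟨hres.1, ?_⟩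
    intro w hw hc hS
    by_cases hcase : m.getD w 0 ≤ k - 1
    · exact hres.2 w hw hc (Or.inl ⟨hS.1, hcase⟩)
    · have hkk : m.getD w 0 = k := by omega
      exact hres.2 w hw hc (Or.inr ⟨hkk, (PySem.Dict.contains_iff_mem_keys _ _).mp hc⟩)

-- ===== VERDICT (by name: the statement is the Claim_ definition above) =====
theorem findLadders2_spec : Claim_equal_findLadders2 := by
  unfold Claim_equal_findLadders2
  intro b e ws _ _
  unfold Spec_findLadders2 findLadders2 findLadders2_alt
  by_cases hw : ws.contains e = true
  · simp only [hw, Bool.not_true, Bool.false_eq_true, if_false]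
    set m := pvWordMap b ws with hm
    have hg : pvGood b m := pvWordMap_good b ws
    by_cases hme : m.contains e = true
    · simp only [hme, Bool.not_true, Bool.false_eq_true, if_false]
      rw [pvBacktrack_eq]
      have hmap : (pvS b m (m.getD e 0).toNat e).map (fun q => q.dropLast ++ [e].reverse) =
          pvS b m (m.getD e 0).toNat e := by
        have hcg : ∀ q ∈ pvS b m (m.getD e 0).toNat e,
            q.dropLast ++ [e].reverse = id q := by
          intro q hq
          rcases pvS_ends b m _ e q hq with ⟨q0, rfl⟩
          simp
        rw [List.map_congr_left hcg, List.map_id]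
      rw [hmap]
      by_cases hbe : e = b
      · -- endWord = beginWord: both sides are [[b]]
        subst hbe
        have hbv : m.getD e 0 = 1 := PySem.Dict.getD_of_get?_eq_some _ _ hg.1
        rw [hbv]
        have hDP := pvDpOuter e m hg 0 1 (by omega)
        rw [PySem.Dict.getD_of_get?_eq_some _ _ hDP.1]
        rw [pvS.eq_def]
        simp
      · have h2 : 2 ≤ m.getD e 0 := hg.2 e hbe hme
        have hDP := pvDpOuter b m hg (m.getD e 0 - 1).toNat (m.getD e 0) (by omega)
        have hget := hDP.2 e hbe hme ⟨h2, le_refl _⟩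
        rw [PySem.Dict.getD_of_get?_eq_some _ _ hget]
    · simp only [hme, Bool.not_false, if_true]
      have heb : (e == b) = false := by
        by_cases he : e = b
        · subst he; exact absurd (pvWordMap_contains_begin e ws) (by simpa [hm] using hme)
        · simpa using he
      have hg0 : m.getD e 0 = 0 := by
        apply PySem.Dict.getD_of_not_contains; simpa using hme
      rw [hg0, pvBacktrack.eq_def]
      simp [heb]
  · have hne : e ∉ ws := by simpa using hw
    simp [hne]

@[simp] theorem findLadders2_raises : Claim_raises_findLadders2 := by
  unfold Claim_raises_findLadders2
  exact ⟨by
    intro b e ws _ hr hpre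
    rcases hr with ⟨h1, h2, n, hn, hnR⟩
    rcases hpre h1 with h | h
    · exact h2 h
    · exact h n hn hnR, by decide⟩
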